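-- pv_equiv track=rewrite | github.com/Koril33/bit-glow | main.py | hex_string_to_bitmap
-- ===== SOURCE A (Python) =====
-- def hex_string_to_bitmap(hex_string, width, height):
--     """
--     解析 C 语言格式的 { 0x00, 0x00, ..., 0x00 } 为 width x height 位图数据
--     :param hex_string: C 数组格式的 16 进制字符串，如 "{ 0x00, 0xFF, ... }"
--     :param width: 位图的宽度（像素）
--     :param height: 位图的高度（像素）
--     :return: 二维数组表示的位图
--     """
--     hex_values = [int(x, 16) for x in hex_string.replace("{", "").replace("}", "").split(",") if x.strip()]
--
--     # 计算每行需要多少字节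
--     bytes_per_row = width // 8
--     if len(hex_values) != bytes_per_row * height:
--         raise ValueError("Hex 数据长度和指定的 width, height 不匹配")
--
--     # 解析成 width x height 的二进制位图
--     bitmap = []
--     for row in range(height):
--         row_bits = []
--         for byte_index in range(bytes_per_row):
--             value = hex_values[row * bytes_per_row + byte_index]
--             bits = [(value >> (7 - i)) & 1 for i in range(8)]  # 高位在前
--             row_bits.extend(bits)
--         bitmap.append(row_bits[:width])  # 确保不会超出 width
--     return bitmap
-- ===== SOURCE B (Python) =====
-- def hex_string_to_bitmap(hex_string, width, height):
--     hex_values = [int(x, 16) for x in hex_string.replace("{", "").replace("}", "").split(",") if x.strip()]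
--     bytes_per_row = width // 8
--     if len(hex_values) != bytes_per_row * height:
--         raise ValueError("Hex 数据长度和指定的 width, height 不匹配")
--     # one flat bit stream (MSB first), reshaped into rows by slicing
--     flat = [(v >> (7 - i)) & 1 for v in hex_values for i in range(8)]
--     step = bytes_per_row * 8
--     return [flat[r * step:(r + 1) * step] for r in range(height)]
-- ===== Notes on version B (the rewrite author's own statement) =====
-- stated objective: alternative
-- what changed: Replaces the per-row per-byte nested extend-and-slice loop by building one flat bit stream from all bytes and reshaping it into rows by slicing.
import Mathlib
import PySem

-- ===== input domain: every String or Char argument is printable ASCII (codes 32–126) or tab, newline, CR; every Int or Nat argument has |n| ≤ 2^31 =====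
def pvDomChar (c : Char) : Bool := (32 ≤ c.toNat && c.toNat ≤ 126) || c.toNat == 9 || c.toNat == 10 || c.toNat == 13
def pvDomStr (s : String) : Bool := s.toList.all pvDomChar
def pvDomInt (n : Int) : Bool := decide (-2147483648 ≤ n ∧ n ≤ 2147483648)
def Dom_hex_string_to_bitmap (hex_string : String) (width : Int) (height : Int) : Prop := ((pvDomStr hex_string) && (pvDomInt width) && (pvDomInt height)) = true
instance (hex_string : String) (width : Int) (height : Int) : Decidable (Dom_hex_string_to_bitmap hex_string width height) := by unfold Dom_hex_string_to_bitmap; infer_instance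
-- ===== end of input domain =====

-- B reshapes one flat bit stream into rows by slicing instead of A's nested per-row per-byte extend loop (alternative decomposition, same cost).

-- ===== PORT A =====
-- shared parse helpers: both Python sources contain the identical
-- 'int(x, 16) for x in hex_string.replace("{","").replace("}","").split(",") if x.strip()' line
def pvPieces (s : String) : List (List Char) :=
  (PySem.Chars.splitOn (PySem.Chars.replace (PySem.Chars.replace s.toList ['{'] []) ['}'] []) [',']).filter
    (fun x => !(PySem.Chars.strip x).isEmpty)

def pvVals (s : String) : List Int :=
  (pvPieces s).map (fun x => (PySem.Int.ofCharsBase? x 16).getD 0)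

-- the bit comprehension '[(value >> (7 - i)) & 1 for i in range(8)]', identical in both sources
def pvBits (v : Int) : List Int :=
  (PySem.List.pyRange 0 8 1).map (fun i => PySem.Int.band (v >>> (7 - i).toNat) 1)

def hex_string_to_bitmap (hex_string : String) (width : Int) (height : Int) : List (List Int) :=
  let hex_values := pvVals hex_string
  let bytes_per_row := PySem.Int.floordiv width 8
  if (hex_values.length : Int) ≠ bytes_per_row * height then []  -- Python: raise ValueError (excluded by Pre_)
  else
    (PySem.List.pyRange 0 height 1).foldl (fun bitmap row =>
      let row_bits := (PySem.List.pyRange 0 bytes_per_row 1).foldl (fun acc byte_index =>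
        let value := PySem.List.pyGetD hex_values (row * bytes_per_row + byte_index) 0
        acc ++ pvBits value) []
      bitmap ++ [PySem.List.slice row_bits none (some width)]) []

-- ===== PORT B =====
def hex_string_to_bitmap_alt (hex_string : String) (width : Int) (height : Int) : List (List Int) :=
  let hex_values := pvVals hex_string
  let bytes_per_row := PySem.Int.floordiv width 8
  if (hex_values.length : Int) ≠ bytes_per_row * height then []  -- Python: raise ValueError (excluded by Pre_)
  else
    let flat := hex_values.flatMap pvBits
    let step := bytes_per_row * 8
    (PySem.List.pyRange 0 height 1).map (fun r =>
      PySem.List.slice flat (some (r * step)) (some ((r + 1) * step)))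

-- ===== PRECONDITION & SPEC =====
-- Pre_ excludes exactly the inputs where A raises: a comma piece that int(x,16) rejects (ValueError),
-- or a parsed byte count different from (width//8)*height (the explicit ValueError).
def Pre_hex_string_to_bitmap (hex_string : String) (width : Int) (height : Int) : Prop :=
  (∀ x ∈ pvPieces hex_string, (PySem.Int.ofCharsBase? x 16).isSome = true) ∧
  ((pvPieces hex_string).length : Int) = PySem.Int.floordiv width 8 * height
instance (hex_string : String) (width : Int) (height : Int) : Decidable (Pre_hex_string_to_bitmap hex_string width height) := by unfold Pre_hex_string_to_bitmap; infer_instance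

def pvWitness_hex_string_to_bitmap : String × Int × Int := ("{ 0xA5, 0x0F }", 8, 2)

def Spec_hex_string_to_bitmap (hex_string : String) (width : Int) (height : Int) (out : List (List Int)) : Prop := out = hex_string_to_bitmap_alt hex_string width height
instance (hex_string : String) (width : Int) (height : Int) (out : List (List Int)) : Decidable (Spec_hex_string_to_bitmap hex_string width height out) := by unfold Spec_hex_string_to_bitmap; infer_instance

-- ===== CLAIM (what is proved, stated in full; the proofs are below) =====
def Claim_equal_hex_string_to_bitmap : Prop := ∀ (hex_string : String) (width : Int) (height : Int), Dom_hex_string_to_bitmap hex_string width height → Pre_hex_string_to_bitmap hex_string width height → Spec_hex_string_to_bitmap hex_string width height (hex_string_to_bitmap hex_string width height)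

-- ===== LEMMAS AND PROOFS =====

theorem pvBits_length (v : Int) : (pvBits v).length = 8 := by
  simp [pvBits, PySem.List.length_pyRange_one]

theorem flatMap_pvBits_length (xs : List Int) : (xs.flatMap pvBits).length = 8 * xs.length := by
  induction xs with
  | nil => simp
  | cons x xs ih => simp [ih, pvBits_length]; ring

theorem flatMap_pvBits_drop (xs : List Int) (k : Nat) :
    (xs.flatMap pvBits).drop (8 * k) = (xs.drop k).flatMap pvBits := by
  induction xs generalizing k with
  | nil => simp
  | cons x xs ih =>
    cases k with
    | zero => simp
    | succ k =>
      simp only [List.flatMap_cons, List.drop_succ_cons, List.drop_append, pvBits_length]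
      rw [show 8 * (k + 1) - 8 = 8 * k by omega, List.drop_of_length_le (by rw [pvBits_length]; omega)]
      simpa using ih k

theorem flatMap_pvBits_take (xs : List Int) (k : Nat) :
    (xs.flatMap pvBits).take (8 * k) = (xs.take k).flatMap pvBits := by
  induction xs generalizing k with
  | nil => simp
  | cons x xs ih =>
    cases k with
    | zero => simp
    | succ k =>
      simp only [List.flatMap_cons, List.take_succ_cons, List.take_append, pvBits_length]
      rw [show 8 * (k + 1) - 8 = 8 * k by omega, List.take_of_length_le (by rw [pvBits_length]; omega)]
      simp [ih k]

-- A's inner byte loop over range(bytes_per_row), flattened, is the bits of the row's byte slice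
theorem rowA_eq (xs : List Int) (B : Nat) (off : Nat) (h : off + B ≤ xs.length) :
    (PySem.List.pyRange 0 (B : Int) 1).flatMap
        (fun b => pvBits (PySem.List.pyGetD xs ((off : Int) + b) 0))
      = ((xs.drop off).take B).flatMap pvBits := by
  induction B with
  | zero => simp [PySem.List.pyRange_one_eq_nil]
  | succ n ih =>
    rw [show ((n + 1 : Nat) : Int) = (n : Int) + 1 by push_cast; ring,
      PySem.List.pyRange_one_succ_right (by positivity), List.flatMap_append,
      ih (by omega)]
    have hlt : off + n < xs.length := by omega
    have hdl : n < (xs.drop off).length := by simp [List.length_drop]; omega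
    rw [List.take_succ, List.getElem?_eq_getElem hdl]
    simp only [List.flatMap_append, List.flatMap_cons, List.flatMap_nil, List.append_nil,
      List.getElem_drop]
    congr 2
    rw [show (off : Int) + (n : Int) = ((off + n : Nat) : Int) by push_cast; ring]
    rw [PySem.List.pyGetD_natCast]
    simp [List.getD_eq_getElem?_getD, List.getElem?_eq_getElem hlt]

-- pointwise: A's sliced row equals B's slice of the flat bit stream
theorem row_eq (xs : List Int) (B H R w' : Nat) (hlen : xs.length = B * H) (hR : R < H)
    (hw : 8 * B ≤ w') :
    PySem.List.slice
        ((PySem.List.pyRange 0 (B : Int) 1).flatMap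
          (fun b => pvBits (PySem.List.pyGetD xs ((R : Int) * (B : Int) + b) 0)))
        none (some (w' : Int))
      = PySem.List.slice (xs.flatMap pvBits) (some ((R : Int) * ((B : Int) * 8)))
          (some (((R : Int) + 1) * ((B : Int) * 8))) := by
  have hoff : R * B + B ≤ xs.length := by
    rw [hlen]
    calc R * B + B = (R + 1) * B := by ring
    _ ≤ H * B := Nat.mul_le_mul_right _ hR
    _ = B * H := Nat.mul_comm _ _
  have h1 : (R : Int) * (B : Int) = ((R * B : Nat) : Int) := by push_cast; ring
  rw [h1, rowA_eq xs B (R * B) hoff]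
  rw [show (R : Int) * ((B : Int) * 8) = ((R * (B * 8) : Nat) : Int) by push_cast; ring,
    show ((R : Int) + 1) * ((B : Int) * 8) = ((R * (B * 8) + B * 8 : Nat) : Int) by push_cast; ring,
    PySem.List.slice_natCast, PySem.List.slice_to_natCast]
  rw [show R * (B * 8) + B * 8 - R * (B * 8) = 8 * B by ring_nf; omega,
    show R * (B * 8) = 8 * (R * B) by ring]
  rw [flatMap_pvBits_drop, flatMap_pvBits_take]
  rw [List.take_of_length_le]
  rw [flatMap_pvBits_length, List.length_take, List.length_drop, hlen]
  have : B ≤ B * H - R * B := by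
    calc B = 1 * B := (Nat.one_mul B).symm
    _ ≤ (H - R) * B := Nat.mul_le_mul_right _ (by omega)
    _ = B * H - R * B := by rw [Nat.sub_mul]; ring_nf
  omega

-- ===== VERDICT (by name: the statement is the Claim_ definition above) =====
theorem hex_string_to_bitmap_spec : Claim_equal_hex_string_to_bitmap := by
  intro hex_string width height _hdom hpre
  obtain ⟨_hparse, hcount⟩ := hpre
  unfold Spec_hex_string_to_bitmap hex_string_to_bitmap hex_string_to_bitmap_alt
  simp only []
  have hvlen : ((pvVals hex_string).length : Int)
      = PySem.Int.floordiv width 8 * height := by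
    simpa [pvVals] using hcount
  rw [if_neg (by simpa using hvlen), if_neg (by simpa using hvlen)]
  set xs := pvVals hex_string with hxs
  set bpr := PySem.Int.floordiv width 8 with hbpr
  rw [PySem.List.foldl_append_singleton_eq_map]
  simp only [List.nil_append]
  apply List.map_congr_left
  intro r hr
  rw [PySem.List.mem_pyRange_one] at hr
  -- positivity bookkeeping
  have hh : 0 < height := lt_of_le_of_lt hr.1 hr.2
  have hbnn : 0 ≤ bpr := by
    by_contra hneg
    push_neg at hneg
    have : bpr * height < 0 := mul_neg_of_neg_of_pos hneg hh
    omega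
  have hbr := (PySem.Int.floordiv_eq_iff_of_pos (a := width) (b := 8) (q := bpr)
    (by norm_num)).mp hbpr.symm
  have hwnn : 0 ≤ width := le_trans (by positivity) hbr.1
  -- name the Nat versions
  have hB : bpr = ((bpr.toNat : Nat) : Int) := (Int.toNat_of_nonneg hbnn).symm
  have hH : height = ((height.toNat : Nat) : Int) := (Int.toNat_of_nonneg hh.le).symm
  have hRc : r = ((r.toNat : Nat) : Int) := (Int.toNat_of_nonneg hr.1).symm
  have hW : width = ((width.toNat : Nat) : Int) := (Int.toNat_of_nonneg hwnn).symm
  have hlenN : xs.length = bpr.toNat * height.toNat := by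
    have : ((xs.length : Int)) = ((bpr.toNat * height.toNat : Nat) : Int) := by
      rw [hvlen, hB, hH]; simp
    exact_mod_cast this
  have hRlt : r.toNat < height.toNat := by omega
  have hw8 : 8 * bpr.toNat ≤ width.toNat := by omega
  -- A's inner foldl is a flatMap
  rw [PySem.List.foldl_append_eq_flatMap]
  simp only [List.nil_append]
  calc PySem.List.slice
        ((PySem.List.pyRange 0 bpr 1).flatMap
          (fun b => pvBits (PySem.List.pyGetD xs (r * bpr + b) 0)))
        none (some width)
      = PySem.List.slice
        ((PySem.List.pyRange 0 ((bpr.toNat : Nat) : Int) 1).flatMap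
          (fun b => pvBits (PySem.List.pyGetD xs (((r.toNat : Nat) : Int) * ((bpr.toNat : Nat) : Int) + b) 0)))
        none (some ((width.toNat : Nat) : Int)) := by rw [← hB, ← hRc, ← hW]
    _ = PySem.List.slice (xs.flatMap pvBits)
          (some (((r.toNat : Nat) : Int) * (((bpr.toNat : Nat) : Int) * 8)))
          (some ((((r.toNat : Nat) : Int) + 1) * (((bpr.toNat : Nat) : Int) * 8))) :=
        row_eq xs bpr.toNat height.toNat r.toNat width.toNat hlenN hRlt hw8
    _ = PySem.List.slice (xs.flatMap pvBits) (some (r * (bpr * 8)))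
          (some ((r + 1) * (bpr * 8))) := by rw [← hB, ← hRc]
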